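-- pv_equiv track=rewrite | github.com/lastdefiance20/backjoon | trash/exex.py | up_idx
-- ===== SOURCE A (Python) =====
-- def up_idx(select, n, table):
--     while n:
--         select -= 1
--         if select < 0:
--             return -1
--         if table[select] == 'O':
--             n -= 1
--     return select
-- ===== SOURCE B (Python) =====
-- def up_idx(select, n, table):
--     if n == 0:
--         return select
--     indices = [i for i in range(select) if table[i] == 'O']
--     if n < 0 or len(indices) < n:
--         return -1
--     return indices[-n]
-- ===== Notes on version B (the rewrite author's own statement) =====
-- stated objective: alternative
-- what changed: Replaced the downward counting while-loop with a forward one-pass list comprehension collecting the 'O' positions below select, followed by a direct negative index indices[-n] (early n==0 / n<0 guards replace the loop's n-truthiness behaviour).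
import Mathlib
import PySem

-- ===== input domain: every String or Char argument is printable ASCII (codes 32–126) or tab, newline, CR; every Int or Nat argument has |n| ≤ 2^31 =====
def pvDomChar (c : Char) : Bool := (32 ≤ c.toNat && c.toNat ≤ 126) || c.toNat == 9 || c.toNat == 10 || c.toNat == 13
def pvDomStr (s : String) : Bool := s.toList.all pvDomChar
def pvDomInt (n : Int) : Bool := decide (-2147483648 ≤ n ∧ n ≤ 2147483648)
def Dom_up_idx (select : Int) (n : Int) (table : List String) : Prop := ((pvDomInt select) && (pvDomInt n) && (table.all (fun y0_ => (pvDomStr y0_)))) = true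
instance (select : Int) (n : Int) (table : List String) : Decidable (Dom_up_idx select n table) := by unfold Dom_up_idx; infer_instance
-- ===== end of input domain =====

-- B replaces A's downward counting while-loop by a forward comprehension of the 'O'
-- positions plus one negative index; same cost, different decomposition (objective: alternative).

-- ===== PORT A =====
-- while n: select -= 1; if select < 0: return -1; if table[select] == 'O': n -= 1
-- table[select] is pyGet?; its default "" is only reached where Python A raises IndexError (outside Pre_).
def up_idx (select : Int) (n : Int) (table : List String) : Int :=
  if n = 0 then select
  else
    if select - 1 < 0 then -1
    else if (PySem.List.pyGet? table (select - 1)).getD "" == "O" then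
      up_idx (select - 1) (n - 1) table
    else
      up_idx (select - 1) n table
termination_by (select + 1).toNat
decreasing_by all_goals omega

-- ===== PORT B =====
-- if n == 0: return select
-- indices = [i for i in range(select) if table[i] == 'O']
-- return -1 if n < 0 or len(indices) < n else indices[-n]
def up_idx_alt (select : Int) (n : Int) (table : List String) : Int :=
  if n = 0 then select
  else
    let indices := (PySem.List.pyRange 0 select 1).filter
      (fun i => (PySem.List.pyGet? table i).getD "" == "O")
    if n < 0 ∨ (indices.length : Int) < n then -1
    else (PySem.List.pyGet? indices (-n)).getD (-1)

-- ===== PRECONDITION & SPEC =====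
-- A raises IndexError exactly when n ≠ 0 and select > len(table) (it reads table[select-1] first);
-- exactly those inputs are excluded.
def Pre_up_idx (select : Int) (n : Int) (table : List String) : Prop :=
  n = 0 ∨ select ≤ (table.length : Int)
instance (select : Int) (n : Int) (table : List String) : Decidable (Pre_up_idx select n table) := by unfold Pre_up_idx; infer_instance

def pvWitness_up_idx : Int × Int × List String := (3, 2, ["O", "X", "O"])

def Spec_up_idx (select : Int) (n : Int) (table : List String) (out : Int) : Prop := out = up_idx_alt select n table
instance (select : Int) (n : Int) (table : List String) (out : Int) : Decidable (Spec_up_idx select n table out) := by unfold Spec_up_idx; infer_instance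

-- ===== CLAIM (what is proved, stated in full; the proofs are below) =====
def Claim_equal_up_idx : Prop := ∀ (select : Int) (n : Int) (table : List String), Dom_up_idx select n table → Pre_up_idx select n table → Spec_up_idx select n table (up_idx select n table)

-- ===== LEMMAS AND PROOFS =====

-- the 'O' positions strictly below s, in increasing order (B's `indices`)
def oIdx (table : List String) (s : Int) : List Int :=
  (PySem.List.pyRange 0 s 1).filter (fun i => (PySem.List.pyGet? table i).getD "" == "O")

lemma oIdx_nonpos (table : List String) (s : Int) (h : s ≤ 0) : oIdx table s = [] := by
  simp [oIdx, PySem.List.pyRange_one_eq_nil (by omega : s ≤ 0)]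

lemma oIdx_step (table : List String) (s : Int) (h : 1 ≤ s) :
    oIdx table s = oIdx table (s - 1) ++
      (if (PySem.List.pyGet? table (s - 1)).getD "" == "O" then [s - 1] else []) := by
  have : PySem.List.pyRange 0 s 1 = PySem.List.pyRange 0 (s - 1) 1 ++ [s - 1] := by
    have h2 := PySem.List.pyRange_one_succ_right (a := 0) (b := s - 1) (by omega)
    rw [show s - 1 + 1 = s by ring] at h2
    exact h2
  simp [oIdx, this, List.filter_append]
  split <;> simp_all

-- indices[-n] on xs ++ [x] for 2 ≤ n reads xs[-(n-1)]
lemma pyGet?_append_singleton_neg {α : Type} (xs : List α) (x : α) (n : Int)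
    (h2 : 2 ≤ n) (hl : n ≤ (xs.length : Int) + 1) :
    PySem.List.pyGet? (xs ++ [x]) (-n) = PySem.List.pyGet? xs (-(n - 1)) := by
  have hn : n = (n.toNat : Int) := by omega
  rw [hn, show -(((n.toNat : Int)) - 1) = -(((n.toNat - 1 : Nat) : Int)) by omega]
  rw [PySem.List.pyGet?_neg_natCast (xs ++ [x]) n.toNat (by omega) (by simp; omega),
      PySem.List.pyGet?_neg_natCast xs (n.toNat - 1) (by omega) (by omega)]
  rw [List.getElem?_append_left (by simp; omega)]
  congr 1
  simp; omega

-- the main loop characterisation: for n ≠ 0 and select in range, A's loop computes B's formula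
lemma up_idx_char (select : Int) (n : Int) (table : List String)
    (hn : n ≠ 0) (hs : select ≤ (table.length : Int)) :
    up_idx select n table =
      if n < 0 ∨ ((oIdx table select).length : Int) < n then -1
      else (PySem.List.pyGet? (oIdx table select) (-n)).getD (-1) := by
  induction select, n using up_idx.induct table with
  | case1 select => exact absurd rfl hn
  | case2 select n h0 hneg =>
    rw [up_idx]
    simp only [if_neg h0, if_pos hneg]
    rw [oIdx_nonpos table select (by omega)]
    rcases lt_or_gt_of_ne hn with h | h
    · simp [h]
    · simp; omega
  | case3 select n h0 hnn hO ih =>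
    rw [up_idx]
    simp only [if_neg h0, if_neg hnn, if_pos hO]
    rw [oIdx_step table select (by omega), if_pos hO]
    by_cases h1 : n - 1 = 0
    · -- n = 1: loop returns select - 1; indices[-1] is the appended element
      have : n = 1 := by omega
      subst this
      simp [up_idx, PySem.List.pyGet?_neg_one_append_singleton]
    · rw [ih h1 (by omega)]
      rcases lt_or_gt_of_ne hn with h | h
      · simp only [List.length_append, List.length_singleton]
        rw [if_pos (Or.inl (by omega)), if_pos (Or.inl h)]
      · simp only [List.length_append, List.length_singleton]
        by_cases hlen : ((oIdx table (select - 1)).length : Int) < n - 1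
        · rw [if_pos (Or.inr hlen), if_pos (Or.inr (by omega))]
        · rw [if_neg (by omega), if_neg (by omega)]
          rw [pyGet?_append_singleton_neg _ _ n (by omega) (by omega)]
  | case4 select n h0 hnn hO ih =>
    rw [up_idx]
    simp only [if_neg h0, if_neg hnn, if_neg hO]
    rw [oIdx_step table select (by omega), if_neg hO, List.append_nil]
    exact ih hn (by omega)

-- ===== VERDICT (by name: the statement is the Claim_ definition above) =====
theorem up_idx_spec : Claim_equal_up_idx := by
  intro select n table _ hpre
  unfold Spec_up_idx up_idx_alt
  by_cases h0 : n = 0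
  · subst h0; rw [up_idx]; simp
  · rw [if_neg h0, up_idx_char select n table h0 (hpre.resolve_left h0)]
    rfl
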